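-- pv_equiv track=rewrite | github.com/hwayne/tutor | errors/errors.py | parenerror
-- ===== SOURCE A (Python) =====
-- from copy import copy
--
-- def nestedcut(tokenstream, tokenpos, direction = 1, cuttokens = ["RPAREN"], upstep = "LPAREN" , downstep = "RPAREN"):
--     step = tokenstream[tokenpos] == upstep
--
--     while True:
-- #Boundary values
--         tokenpos += direction
--         if tokenpos == len(tokenstream): return tokenpos
--         elif tokenpos == -1: return tokenpos
--
--         elem = tokenstream[tokenpos]
--         if  elem == upstep: step += 1
--         elif elem == downstep: step -= 1
--         if elem in cuttokens and step == 0: return tokenpos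
--
-- def parenerror(problem):
--     newproblems = []
--     for pos in range(len(problem)):
--         if problem[pos] == "LPAREN":
--             y = nestedcut(problem,pos)
--             temp = copy(problem)
--             temp.pop(y)
--             temp.pop(pos) #So as not to move y
--             newproblems.append((temp, "dropped parenthesis"))
--     return newproblems
-- ===== SOURCE B (Python) =====
-- def parenerror(problem):
--     # One pass computes every LPAREN's matching RPAREN via a stack,
--     # instead of re-scanning the stream from each LPAREN.
--     stack = []
--     matches = {}
--     for i, tok in enumerate(problem):
--         if tok == "LPAREN":
--             stack.append(i)
--         elif tok == "RPAREN" and stack: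
--             matches[stack.pop()] = i
--     newproblems = []
--     for i, tok in enumerate(problem):
--         if tok == "LPAREN":
--             y = matches[i]
--             temp = problem.copy()
--             temp.pop(y)
--             temp.pop(i)
--             newproblems.append((temp, "dropped parenthesis"))
--     return newproblems
-- ===== Notes on version B (the rewrite author's own statement) =====
-- stated objective: idiomatic
-- what changed: B computes every LPAREN's matching RPAREN in one left-to-right pass with a stack of open positions recorded into a dictionary, instead of re-scanning the token stream from each LPAREN with a counter as A's nestedcut does.
import Mathlib
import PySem

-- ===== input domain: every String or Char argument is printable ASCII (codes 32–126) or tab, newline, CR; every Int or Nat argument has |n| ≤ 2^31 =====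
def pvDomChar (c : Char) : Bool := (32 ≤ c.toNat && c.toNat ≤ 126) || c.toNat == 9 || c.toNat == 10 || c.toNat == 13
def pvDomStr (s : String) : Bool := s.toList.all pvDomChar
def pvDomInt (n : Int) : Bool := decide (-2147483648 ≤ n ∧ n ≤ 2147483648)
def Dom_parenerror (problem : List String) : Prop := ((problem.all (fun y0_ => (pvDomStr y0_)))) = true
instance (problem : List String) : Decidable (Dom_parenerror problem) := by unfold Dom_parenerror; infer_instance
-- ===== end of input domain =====

-- B replaces A's per-LPAREN re-scan (nestedcut) by one stack pass that records every
-- LPAREN→RPAREN match in a dictionary; objective: the idiomatic single-pass matcher.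


-- ===== PORT A =====
-- the while-loop of nestedcut, as fuel recursion; the fuel passed by nestedcut below
-- exceeds the number of iterations of every direction = 1 call (the only call made),
-- so the port is exact there
def nestedcutGo (ts cut : List String) (up down : String) (dir : Int) :
    Nat → Int → Int → Int
  | 0, pos, _ => pos
  | fuel+1, pos, step =>
    let pos' := pos + dir
    if pos' = (ts.length : Int) then pos'
    else if pos' = -1 then pos'
    else
      -- elem = tokenstream[tokenpos]: in range on every direction = 1 scan
      let elem := PySem.List.pyGetD ts pos' ""
      let step' := if elem = up then step + 1 else if elem = down then step - 1 else step
      if elem ∈ cut ∧ step' = 0 then pos' else nestedcutGo ts cut up down dir fuel pos' step'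

def nestedcut (tokenstream : List String) (tokenpos : Int) (direction : Int)
    (cuttokens : List String) (upstep downstep : String) : Int :=
  -- step = tokenstream[tokenpos] == upstep  (True/False used as 1/0)
  nestedcutGo tokenstream cuttokens upstep downstep direction (tokenstream.length + 1)
    tokenpos (if PySem.List.pyGetD tokenstream tokenpos "" = upstep then 1 else 0)

def parenerror (problem : List String) : List (List String × String) :=
  (PySem.List.pyRange 0 (PySem.List.len problem) 1).foldl (fun acc pos =>
    if PySem.List.pyGetD problem pos "" = "LPAREN" then
      let y := nestedcut problem pos 1 ["RPAREN"] "LPAREN" "RPAREN"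
      -- temp.pop(y); temp.pop(pos): pop? = none is Python's IndexError (unmatched
      -- LPAREN, y = len(problem)); those inputs are excluded by Pre_parenerror
      let temp := ((PySem.List.pop? problem y).map Prod.snd).getD problem
      let temp2 := ((PySem.List.pop? temp pos).map Prod.snd).getD temp
      acc ++ [(temp2, "dropped parenthesis")]
    else acc) []

-- ===== PORT B =====
-- Source B's first pass: stack of open LPAREN positions (kept top-first; Python appends
-- and pops at the right end — same stack contents) and the dict of matches
def parenerrorMatches (problem : List String) : List Int × PySem.Dict Int Int :=
  (PySem.List.enumerate problem 0).foldl (fun st pr =>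
    if pr.2 = "LPAREN" then (pr.1 :: st.1, st.2)
    else if pr.2 = "RPAREN" then
      match st.1 with
      | t :: rest => (rest, st.2.insert t pr.1)
      | [] => st
    else st) ([], PySem.Dict.empty)

def parenerror_alt (problem : List String) : List (List String × String) :=
  let ms := (parenerrorMatches problem).2
  (PySem.List.enumerate problem 0).foldl (fun acc pr =>
    if pr.2 = "LPAREN" then
      -- y = matches[i]: a missing key is Python's KeyError (unmatched LPAREN),
      -- excluded by Pre_parenerror
      let y := (ms.get? pr.1).getD (-1)
      let temp := ((PySem.List.pop? problem y).map Prod.snd).getD problem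
      let temp2 := ((PySem.List.pop? temp pr.1).map Prod.snd).getD temp
      acc ++ [(temp2, "dropped parenthesis")]
    else acc) []

-- ===== PRECONDITION & SPEC =====
-- paren depth of the length-k prefix
def pvDepth (p : List String) (k : Nat) : Int :=
  ((p.take k).count "LPAREN" : Int) - ((p.take k).count "RPAREN" : Int)

-- Pre_ excludes exactly the inputs where A raises IndexError: an "LPAREN" whose
-- depth level is never closed again (nestedcut returns len(problem) and pop raises).
-- B raises KeyError on exactly the same inputs.
def Pre_parenerror (problem : List String) : Prop :=
  ∀ i ∈ List.range problem.length, problem.getD i "" = "LPAREN" →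
    ∃ j ∈ List.range problem.length, i < j ∧ pvDepth problem (j+1) = pvDepth problem i

instance (problem : List String) : Decidable (Pre_parenerror problem) := by
  unfold Pre_parenerror; infer_instance

def pvWitness_parenerror : List String := ["LPAREN", "x", "RPAREN"]

def Spec_parenerror (problem : List String) (out : List (List String × String)) : Prop := out = parenerror_alt problem
instance (problem : List String) (out : List (List String × String)) : Decidable (Spec_parenerror problem out) := by unfold Spec_parenerror; infer_instance

-- ===== CLAIM (what is proved, stated in full; the proofs are below) =====
def Claim_equal_parenerror : Prop := ∀ (problem : List String), Dom_parenerror problem → Pre_parenerror problem → Spec_parenerror problem (parenerror problem)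

-- ===== LEMMAS AND PROOFS =====

-- reference scanner: first j ≥ m whose token closes the counter, else p.length
def mfind (p : List String) (m : Nat) (step : Int) : Nat :=
  if h : m < p.length then
    let step' := step + (if p[m] = "LPAREN" then 1 else if p[m] = "RPAREN" then -1 else 0)
    if p[m] = "RPAREN" ∧ step' = 0 then m else mfind p (m+1) step'
  else p.length
termination_by p.length - m

-- position i is still open throughout [i+1, k): the depth never returns to pvDepth p i
def pvOpn (p : List String) (i k : Nat) : Prop :=
  ∀ t, i < t → t < k → pvDepth p (t+1) ≠ pvDepth p i

-- the stack's depth chain: d = depth of the top + 1, and so on downwards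
def pvSC (p : List String) : Int → List Int → Prop
  | _, [] => True
  | d, a :: rest => ∃ aN : Nat, a = (aN : Int) ∧ d = pvDepth p aN + 1 ∧ pvSC p (pvDepth p aN) rest

-- invariant of B's first pass after k tokens
def pvInv (p : List String) (k : Nat) (s : List Int × PySem.Dict Int Int) : Prop :=
  (∀ a ∈ s.1, ∃ aN : Nat, a = (aN : Int) ∧ aN < k ∧ p.getD aN "" = "LPAREN" ∧ pvOpn p aN k) ∧
  pvSC p (pvDepth p k) s.1 ∧
  (∀ iN : Nat, iN < k → p.getD iN "" = "LPAREN" →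
      ((iN : Int) ∈ s.1 ∨ (s.2.get? (iN : Int)).isSome)) ∧
  (∀ i j : Int, s.2.get? i = some j →
      ∃ iN : Nat, i = (iN : Int) ∧ iN < k ∧ j = ((mfind p (iN+1) 1 : Nat) : Int))

lemma getD_eq_getElem' (p : List String) (k : Nat) (h : k < p.length) :
    p.getD k "" = p[k] := by
  rw [List.getD_eq_getElem?_getD, List.getElem?_eq_getElem h, Option.getD_some]

lemma pvDepth_succ (p : List String) (k : Nat) (h : k < p.length) :
    pvDepth p (k+1) = pvDepth p k +
      (if p[k] = "LPAREN" then 1 else if p[k] = "RPAREN" then -1 else 0) := by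
  have ht : p.take (k+1) = p.take k ++ [p[k]] := by
    rw [List.take_add_one, List.getElem?_eq_getElem h]; rfl
  simp only [pvDepth, ht, List.count_append, List.count_singleton]
  split_ifs with h1 h2 <;> simp_all <;> ring

lemma pvSC_mem (p : List String) : ∀ (st : List Int) (d a : Int), pvSC p d st → a ∈ st →
    ∃ aN : Nat, a = (aN : Int) ∧ pvDepth p aN < d := by
  intro st
  induction st with
  | nil => intro d a _ ha; simp at ha
  | cons b rest ih =>
    intro d a hsc ha
    obtain ⟨bN, rfl, hd, hrest⟩ := hsc
    rcases List.mem_cons.mp ha with rfl | ha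
    · exact ⟨bN, rfl, by omega⟩
    · obtain ⟨aN, rfl, hlt⟩ := ih _ a hrest ha
      exact ⟨aN, rfl, by omega⟩

lemma mfind_at_ret (p : List String) (i j : Nat) (hj : j < p.length)
    (hr : p.getD j "" = "RPAREN") (hd : pvDepth p (j+1) = pvDepth p i) :
    mfind p j (pvDepth p j - pvDepth p i) = j := by
  have hje : p[j] = "RPAREN" := by
    rwa [List.getD_eq_getElem?_getD, List.getElem?_eq_getElem hj, Option.getD_some] at hr
  have hstep : pvDepth p j - pvDepth p i + (if p[j] = "LPAREN" then (1:Int) else if p[j] = "RPAREN" then -1 else 0) = 0 := by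
    have := pvDepth_succ p j hj
    omega
  rw [mfind]
  simp only [dif_pos hj]
  rw [if_pos ⟨hje, hstep⟩]

lemma mfind_ret (p : List String) (i j : Nat) (hj : j < p.length)
    (hr : p.getD j "" = "RPAREN") (hd : pvDepth p (j+1) = pvDepth p i)
    (ho : pvOpn p i j) :
    ∀ m, i < m → m ≤ j → mfind p m (pvDepth p m - pvDepth p i) = j := by
  have key : ∀ n m, i < m → m ≤ j → j - m ≤ n → mfind p m (pvDepth p m - pvDepth p i) = j := by
    intro n
    induction n with
    | zero =>
      intro m him hmj hn
      have he : m = j := by omega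
      rw [he]
      exact mfind_at_ret p i j hj hr hd
    | succ n ih =>
      intro m him hmj hn
      by_cases hmj' : m = j
      · rw [hmj']
        exact mfind_at_ret p i j hj hr hd
      · have hmlt : m < j := by omega
        have hm : m < p.length := by omega
        rw [mfind]
        simp only [dif_pos hm]
        have hne : pvDepth p (m+1) ≠ pvDepth p i := ho m him hmlt
        have hstep : pvDepth p m - pvDepth p i + (if p[m] = "LPAREN" then (1:Int) else if p[m] = "RPAREN" then -1 else 0) = pvDepth p (m+1) - pvDepth p i := by
          have := pvDepth_succ p m hm
          omega
        rw [if_neg, hstep]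
        · exact ih (m+1) (by omega) (by omega) (by omega)
        · rintro ⟨h1, h2⟩
          rw [hstep] at h2
          omega
  intro m him hmj
  exact key (j - m) m him hmj le_rfl

lemma go_eq_mfind (p : List String) : ∀ (fuel : Nat) (j : Nat) (step : Int),
    j < p.length → p.length ≤ j + fuel →
    nestedcutGo p ["RPAREN"] "LPAREN" "RPAREN" 1 fuel (j : Int) step
      = ((mfind p (j+1) step : Nat) : Int) := by
  intro fuel
  induction fuel with
  | zero => intro j step h1 h2; omega
  | succ fuel ih =>
    intro j step h1 h2
    rw [nestedcutGo]
    simp only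
    by_cases hend : j + 1 = p.length
    · rw [if_pos (by omega)]
      rw [mfind, dif_neg (by omega)]
      omega
    · have hlt : j + 1 < p.length := by omega
      rw [if_neg (by omega), if_neg (by omega)]
      have hget : PySem.List.pyGetD p ((j:Int) + 1) "" = p[j+1] := by
        have : ((j:Int) + 1) = ((j+1 : Nat) : Int) := by omega
        rw [this, PySem.List.pyGetD_natCast, List.getD_eq_getElem?_getD,
          List.getElem?_eq_getElem hlt, Option.getD_some]
      rw [hget]
      rw [mfind, dif_pos hlt]
      simp only [List.mem_singleton]
      by_cases hret : p[j+1] = "RPAREN" ∧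
          (step + (if p[j+1] = "LPAREN" then (1:Int) else if p[j+1] = "RPAREN" then -1 else 0)) = 0
      · obtain ⟨hr, hs⟩ := hret
        rw [if_pos ⟨hr, by simp [hr] at hs ⊢; omega⟩, if_pos ⟨hr, hs⟩]
        omega
      · have hret' : ¬ (p[j+1] = "RPAREN" ∧
            (if p[j+1] = "LPAREN" then step + 1 else if p[j+1] = "RPAREN" then step - 1 else step) = 0) := by
          intro ⟨hr, hs⟩
          exact hret ⟨hr, by simp [hr] at hs ⊢; omega⟩
        rw [if_neg hret', if_neg hret]
        have hcast : (j:Int) + 1 = ((j+1 : Nat) : Int) := by omega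
        rw [hcast, ih (j+1) _ hlt (by omega)]
        congr 2
        split_ifs <;> ring

lemma nestedcut_eq (p : List String) (j : Nat) (hj : j < p.length)
    (hL : p.getD j "" = "LPAREN") :
    nestedcut p (j : Int) 1 ["RPAREN"] "LPAREN" "RPAREN" = ((mfind p (j+1) 1 : Nat) : Int) := by
  rw [nestedcut]
  rw [PySem.List.pyGetD_natCast, if_pos hL]
  exact go_eq_mfind p (p.length + 1) j 1 hj (by omega)

lemma pvInv_step (p : List String) (k : Nat) (hk : k < p.length)
    (s : List Int × PySem.Dict Int Int) (hinv : pvInv p k s) :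
    pvInv p (k+1) (if p[k] = "LPAREN" then ((k:Int) :: s.1, s.2)
      else if p[k] = "RPAREN" then
        match s.1 with
        | t :: rest => (rest, s.2.insert t (k:Int))
        | [] => s
      else s) := by
  obtain ⟨st, ms⟩ := s
  obtain ⟨h1, h2, h3, h4⟩ := hinv
  dsimp only at h1 h2 h3 h4
  have hgetDk := getD_eq_getElem' p k hk
  have hds := pvDepth_succ p k hk
  by_cases hL : p[k] = "LPAREN"
  · rw [if_pos hL]
    rw [hL] at hds
    rw [if_pos rfl] at hds
    refine ⟨?_, ?_, ?_, ?_⟩ <;> dsimp only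
    · intro a ha
      rcases List.mem_cons.mp ha with rfl | ha
      · exact ⟨k, rfl, by omega, by rw [hgetDk, hL], fun t ht1 ht2 => by omega⟩
      · obtain ⟨aN, rfl, hak, haL, hopn⟩ := h1 a ha
        refine ⟨aN, rfl, by omega, haL, ?_⟩
        intro t ht1 ht2
        by_cases htk : t = k
        · obtain ⟨aN', heq, hlt⟩ := pvSC_mem p st _ _ h2 ha
          have heq2 : aN = aN' := by exact_mod_cast heq
          subst heq2
          rw [htk]
          omega
        · exact hopn t ht1 (by omega)
    · exact ⟨k, rfl, by omega, h2⟩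
    · intro iN hiN hiL
      by_cases hik : iN = k
      · subst hik; exact Or.inl (List.mem_cons_self ..)
      · rcases h3 iN (by omega) hiL with h | h
        · exact Or.inl (List.mem_cons_of_mem _ h)
        · exact Or.inr h
    · intro i j hij
      obtain ⟨iN, rfl, hik, hj⟩ := h4 i j hij
      exact ⟨iN, rfl, by omega, hj⟩
  · by_cases hR : p[k] = "RPAREN"
    · rw [if_neg hL, if_pos hR]
      rw [hR] at hds
      rw [if_neg (by decide), if_pos rfl] at hds
      rcases st with _ | ⟨a, rest⟩
      · refine ⟨?_, ?_, ?_, ?_⟩ <;> dsimp only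
        · intro a ha; simp at ha
        · exact trivial
        · intro iN hiN hiL
          by_cases hik : iN = k
          · subst hik; rw [hgetDk, hR] at hiL; simp at hiL
          · rcases h3 iN (by omega) hiL with h | h
            · simp at h
            · exact Or.inr h
        · intro i j hij
          obtain ⟨iN, rfl, hik, hj⟩ := h4 i j hij
          exact ⟨iN, rfl, by omega, hj⟩
      · obtain ⟨aN, rfl, hdk, hscrest⟩ := h2
        obtain ⟨aN', heq, hak, haL, haopn⟩ := h1 _ (List.mem_cons_self ..)
        have heq2 : aN = aN' := by exact_mod_cast heq
        subst heq2
        have hdk1 : pvDepth p (k+1) = pvDepth p aN := by omega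
        refine ⟨?_, ?_, ?_, ?_⟩ <;> dsimp only
        · intro b hb
          obtain ⟨bN, rfl, hbk, hbL, hbopn⟩ := h1 b (List.mem_cons_of_mem _ hb)
          refine ⟨bN, rfl, by omega, hbL, ?_⟩
          intro t ht1 ht2
          by_cases htk : t = k
          · obtain ⟨bN', heq', hlt⟩ := pvSC_mem p rest _ _ hscrest hb
            have heq3 : bN = bN' := by exact_mod_cast heq'
            subst heq3
            rw [htk]
            omega
          · exact hbopn t ht1 (by omega)
        · rw [hdk1]; exact hscrest
        · intro iN hiN hiL
          by_cases hik : iN = k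
          · subst hik; rw [hgetDk, hR] at hiL; simp at hiL
          · rcases h3 iN (by omega) hiL with h | h
            · rcases List.mem_cons.mp h with heq3 | h
              · refine Or.inr ?_
                rw [heq3, PySem.Dict.get?_insert_self]
                simp
              · exact Or.inl h
            · refine Or.inr ?_
              rw [PySem.Dict.get?_insert]
              split_ifs with hcase
              · simp
              · exact h
        · intro i j hij
          rw [PySem.Dict.get?_insert] at hij
          split_ifs at hij with hcase
          · injection hij with hj2
            subst hj2
            refine ⟨aN, hcase, by omega, ?_⟩
            have hstep1 : pvDepth p (aN+1) = pvDepth p aN + 1 := by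
              have h5 := pvDepth_succ p aN (by omega)
              rw [getD_eq_getElem' p aN (by omega)] at haL
              rw [haL] at h5
              simpa using h5
            have h6 := mfind_ret p aN k hk (by rw [hgetDk, hR]) hdk1 haopn (aN+1)
              (by omega) (by omega)
            rw [hstep1] at h6
            simp only [add_sub_cancel_left] at h6
            rw [h6]
          · obtain ⟨iN, rfl, hik, hj⟩ := h4 i j hij
            exact ⟨iN, rfl, by omega, hj⟩
    · rw [if_neg hL, if_neg hR]
      rw [if_neg hL, if_neg hR] at hds
      refine ⟨?_, ?_, ?_, ?_⟩ <;> dsimp only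
      · intro a ha
        obtain ⟨aN, rfl, hak, haL, hopn⟩ := h1 a ha
        refine ⟨aN, rfl, by omega, haL, ?_⟩
        intro t ht1 ht2
        by_cases htk : t = k
        · subst htk
          obtain ⟨aN', heq, hlt⟩ := pvSC_mem p st _ _ h2 ha
          have heq2 : aN = aN' := by exact_mod_cast heq
          subst heq2
          omega
        · exact hopn t ht1 (by omega)
      · have hds2 : pvDepth p (k+1) = pvDepth p k := by omega
        rw [hds2]; exact h2
      · intro iN hiN hiL
        by_cases hik : iN = k
        · subst hik; rw [hgetDk] at hiL; rw [hiL] at hL; simp at hL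
        · exact h3 iN (by omega) hiL
      · intro i j hij
        obtain ⟨iN, rfl, hik, hj⟩ := h4 i j hij
        exact ⟨iN, rfl, by omega, hj⟩

lemma pass1_inv (p : List String) : ∀ k, k ≤ p.length →
    pvInv p k ((PySem.List.enumerate (p.take k) 0).foldl (fun st pr =>
      if pr.2 = "LPAREN" then (pr.1 :: st.1, st.2)
      else if pr.2 = "RPAREN" then
        match st.1 with
        | t :: rest => (rest, st.2.insert t pr.1)
        | [] => st
      else st) ([], PySem.Dict.empty)) := by
  intro k
  induction k with
  | zero =>
    intro _
    rw [List.take_zero, PySem.List.enumerate_nil, List.foldl_nil]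
    refine ⟨?_, trivial, ?_, ?_⟩
    · intro a ha; simp at ha
    · intro iN h; omega
    · intro i j hij; rw [PySem.Dict.get?_empty] at hij; cases hij
  | succ k ih =>
    intro hk1
    have hk : k < p.length := by omega
    have ht : p.take (k+1) = p.take k ++ [p[k]] := by
      rw [List.take_add_one, List.getElem?_eq_getElem hk]; rfl
    have hlen : (p.take k).length = k := by
      rw [List.length_take]; omega
    rw [ht, PySem.List.enumerate_append, List.foldl_append, hlen,
      PySem.List.enumerate_cons, PySem.List.enumerate_nil, List.foldl_cons, List.foldl_nil]
    simp only [zero_add]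
    exact pvInv_step p k hk _ (ih (by omega))

lemma matches_get (p : List String) (hpre : Pre_parenerror p) (i : Nat)
    (hi : i < p.length) (hL : p.getD i "" = "LPAREN") :
    (parenerrorMatches p).2.get? (i : Int) = some ((mfind p (i+1) 1 : Nat) : Int) := by
  have hinv := pass1_inv p p.length le_rfl
  rw [List.take_length] at hinv
  have hms : parenerrorMatches p = ((PySem.List.enumerate p 0).foldl (fun st pr =>
      if pr.2 = "LPAREN" then (pr.1 :: st.1, st.2)
      else if pr.2 = "RPAREN" then
        match st.1 with
        | t :: rest => (rest, st.2.insert t pr.1)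
        | [] => st
      else st) ([], PySem.Dict.empty)) := rfl
  rw [hms]
  obtain ⟨h1, _, h3, h4⟩ := hinv
  rcases h3 i hi hL with hmem | hsome
  · obtain ⟨aN, heq, _, _, hopn⟩ := h1 _ hmem
    have heq2 : i = aN := by exact_mod_cast heq
    subst heq2
    obtain ⟨j, hjr, hij, hdj⟩ := hpre i (List.mem_range.mpr hi) hL
    exact absurd hdj (hopn j hij (List.mem_range.mp hjr))
  · obtain ⟨j, hj⟩ := Option.isSome_iff_exists.mp hsome
    obtain ⟨iN, hiN, _, hjv⟩ := h4 _ _ hj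
    have heq2 : i = iN := by exact_mod_cast hiN
    subst heq2
    rw [hj, hjv]

-- ===== VERDICT (by name: the statement is the Claim_ definition above) =====
theorem parenerror_spec : Claim_equal_parenerror := by
  intro p _hdom hpre
  unfold Spec_parenerror parenerror parenerror_alt
  simp only [PySem.List.enumerate_eq_map_pyRange (d := ""), List.foldl_map, PySem.List.len_eq]
  apply PySem.List.foldl_congr_mem
  intro acc x hx
  obtain ⟨hx0, hxn⟩ := PySem.List.mem_pyRange_one.mp hx
  obtain ⟨jN, rfl⟩ : ∃ jN : Nat, x = (jN : Int) := ⟨x.toNat, (Int.toNat_of_nonneg hx0).symm⟩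
  have hjN : jN < p.length := by exact_mod_cast hxn
  simp only [PySem.List.pyGetD_natCast]
  by_cases hL : p.getD jN "" = "LPAREN"
  · rw [if_pos hL, if_pos hL, nestedcut_eq p jN hjN hL, matches_get p hpre jN hjN hL,
      Option.getD_some]
  · rw [if_neg hL, if_neg hL]
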